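-- pv_equiv track=rewrite | github.com/skdltn210/Algorithm | 프로그래머스/lv0/120956. 옹알이 （1）/옹알이 （1）.py | solution
-- ===== SOURCE A (Python) =====
-- from collections import deque
--
-- def solution(babbling):
--     cnt = 0
--     for i in babbling:
--         stack = []
--         d = deque(i)
--         while d:
--             a = d.popleft()
--             stack.append(a)
--             if ''.join(stack) == 'aya' or ''.join(stack) =='woo' or ''.join(stack) == 'ye' or ''.join(stack) == 'ma':
--                 stack = []
--         if ''.join(stack) == '':
--             cnt+=1
--     return cnt
-- ===== SOURCE B (Python) =====
-- def solution(babbling):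
--     def ok(s):
--         if not s:
--             return True
--         for t in ("aya", "woo", "ye", "ma"):
--             if s.startswith(t):
--                 return ok(s[len(t):])
--         return False
--     return sum(ok(w) for w in babbling)
-- ===== Notes on version B (the rewrite author's own statement) =====
-- stated objective: simpler
-- what changed: Replaced A's per-character buffer state machine (deque + stack rebuilt and re-joined after every char) with a token-level recursive recognizer that strips one of the four token prefixes at a time; correct because the tokens have pairwise distinct first letters.
import Mathlib
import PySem

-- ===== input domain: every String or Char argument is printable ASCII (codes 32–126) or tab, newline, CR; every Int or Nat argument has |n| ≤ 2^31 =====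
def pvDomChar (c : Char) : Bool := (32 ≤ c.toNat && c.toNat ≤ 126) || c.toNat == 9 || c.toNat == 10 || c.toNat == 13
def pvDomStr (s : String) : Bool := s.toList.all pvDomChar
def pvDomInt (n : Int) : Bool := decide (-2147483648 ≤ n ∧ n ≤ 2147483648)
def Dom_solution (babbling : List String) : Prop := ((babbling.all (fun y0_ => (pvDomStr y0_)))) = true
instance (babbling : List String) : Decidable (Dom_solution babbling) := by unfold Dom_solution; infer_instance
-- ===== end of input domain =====

-- B replaces A's per-character buffer state machine with a token-level recursive
-- recognizer stripping one of the four token prefixes at a time (objective: simpler).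

-- ===== PORT A =====
-- The inner while loop over the deque: stack of chars, reset when the joined stack
-- equals a token.  ''.join(stack) == 'aya' is ported as char-list equality with
-- ['a','y','a'] (exact: join of single chars equals the string iff the char lists are equal).
def loopA : List Char → List Char → List Char
  | stack, [] => stack
  | stack, a :: rest =>
    let st := stack ++ [a]
    if st = ['a','y','a'] ∨ st = ['w','o','o'] ∨ st = ['y','e'] ∨ st = ['m','a'] then
      loopA [] rest
    else
      loopA st rest

def solution (babbling : List String) : Int :=
  babbling.foldl (fun cnt i =>
    if loopA [] i.toList = [] then cnt + 1 else cnt) 0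

-- ===== PORT B =====
-- ok(s): empty accepts; otherwise strip the (unique, by first letter) matching token and recurse.
def okB (s : List Char) : Bool :=
  if _h : s = [] then true
  else if ['a','y','a'].isPrefixOf s then okB (s.drop 3)
  else if ['w','o','o'].isPrefixOf s then okB (s.drop 3)
  else if ['y','e'].isPrefixOf s then okB (s.drop 2)
  else if ['m','a'].isPrefixOf s then okB (s.drop 2)
  else false
termination_by s.length
decreasing_by
  all_goals
    have : 0 < s.length := List.length_pos_iff.mpr _h
    simp [List.length_drop]; omega

def solution_alt (babbling : List String) : Int :=
  (babbling.map (fun w => if okB w.toList then (1 : Int) else 0)).sum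

-- ===== PRECONDITION & SPEC =====
def Spec_solution (babbling : List String) (out : Int) : Prop := out = solution_alt babbling
instance (babbling : List String) (out : Int) : Decidable (Spec_solution babbling out) := by unfold Spec_solution; infer_instance

-- ===== CLAIM (what is proved, stated in full; the proofs are below) =====
def Claim_equal_solution : Prop := ∀ (babbling : List String), Dom_solution babbling → Spec_solution babbling (solution babbling)

-- ===== LEMMAS AND PROOFS =====

-- A buffer that is not a prefix of any token can never be cleared again.
lemma loopA_dead (d : List Char) : ∀ st : List Char, st ≠ [] →
    (¬ st <+: ['a','y','a']) → (¬ st <+: ['w','o','o']) →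
    (¬ st <+: ['y','e']) → (¬ st <+: ['m','a']) →
    loopA st d ≠ [] := by
  induction d with
  | nil => intro st h _ _ _ _; simpa [loopA] using h
  | cons a rest ih =>
    intro st h h1 h2 h3 h4
    have e1 : st ++ [a] ≠ ['a','y','a'] := fun he => h1 (he ▸ List.prefix_append st [a])
    have e2 : st ++ [a] ≠ ['w','o','o'] := fun he => h2 (he ▸ List.prefix_append st [a])
    have e3 : st ++ [a] ≠ ['y','e'] := fun he => h3 (he ▸ List.prefix_append st [a])
    have e4 : st ++ [a] ≠ ['m','a'] := fun he => h4 (he ▸ List.prefix_append st [a])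
    have p1 : ¬ st ++ [a] <+: ['a','y','a'] := fun hp => h1 ((List.prefix_append st [a]).trans hp)
    have p2 : ¬ st ++ [a] <+: ['w','o','o'] := fun hp => h2 ((List.prefix_append st [a]).trans hp)
    have p3 : ¬ st ++ [a] <+: ['y','e'] := fun hp => h3 ((List.prefix_append st [a]).trans hp)
    have p4 : ¬ st ++ [a] <+: ['m','a'] := fun hp => h4 ((List.prefix_append st [a]).trans hp)
    simp only [loopA, e1, e2, e3, e4, or_self, if_false]
    exact ih (st ++ [a]) (by simp) p1 p2 p3 p4

-- Core: A's char machine accepts exactly the strings B's token recognizer accepts.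
lemma loopA_okB : ∀ n (cs : List Char), cs.length ≤ n → (loopA [] cs = [] ↔ okB cs = true) := by
  intro n
  induction n with
  | zero =>
    intro cs hlen
    have : cs = [] := List.length_eq_zero_iff.mp (Nat.le_zero.mp hlen)
    subst this; simp [loopA, okB]
  | succ n ih =>
    intro cs hlen
    rcases cs with _ | ⟨c, rest⟩
    · simp [loopA, okB]
    · by_cases ha : c = 'a'
      · subst ha
        rcases rest with _ | ⟨c2, r2⟩
        · simp [loopA, okB, List.isPrefixOf]
        · by_cases h2 : c2 = 'y'
          · subst h2
            rcases r2 with _ | ⟨c3, r3⟩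
            · simp [loopA, okB, List.isPrefixOf]
            · by_cases h3 : c3 = 'a'
              · subst h3
                have hr : r3.length ≤ n := by simp at hlen; omega
                have el : loopA [] ('a'::'y'::'a'::r3) = loopA [] r3 := by simp [loopA]
                have eo : okB ('a'::'y'::'a'::r3) = okB r3 := by
                  conv_lhs => rw [okB]
                  simp [List.isPrefixOf]
                rw [el, eo]
                exact ih r3 hr
              · have h3' : ¬ ('a' = c3) := fun h => h3 h.symm
                have hdead := loopA_dead r3 ['a', 'y', c3] (by simp)
                  (by simp [List.cons_prefix_cons, h3])
                  (by simp [List.cons_prefix_cons])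
                  (by simp [List.cons_prefix_cons])
                  (by simp [List.cons_prefix_cons])
                simp [loopA, okB, List.isPrefixOf, h3, h3', hdead]
          · have h2' : ¬ ('y' = c2) := fun h => h2 h.symm
            have hdead := loopA_dead r2 ['a', c2] (by simp)
              (by simp [List.cons_prefix_cons, h2])
              (by simp [List.cons_prefix_cons])
              (by simp [List.cons_prefix_cons])
              (by simp [List.cons_prefix_cons])
            simp [loopA, okB, List.isPrefixOf, h2, h2', hdead]
      · by_cases hw : c = 'w'
        · subst hw
          rcases rest with _ | ⟨c2, r2⟩
          · simp [loopA, okB, List.isPrefixOf]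
          · by_cases h2 : c2 = 'o'
            · subst h2
              rcases r2 with _ | ⟨c3, r3⟩
              · simp [loopA, okB, List.isPrefixOf]
              · by_cases h3 : c3 = 'o'
                · subst h3
                  have hr : r3.length ≤ n := by simp at hlen; omega
                  have el : loopA [] ('w'::'o'::'o'::r3) = loopA [] r3 := by simp [loopA]
                  have eo : okB ('w'::'o'::'o'::r3) = okB r3 := by
                    conv_lhs => rw [okB]
                    simp [List.isPrefixOf]
                  rw [el, eo]
                  exact ih r3 hr
                · have h3' : ¬ ('o' = c3) := fun h => h3 h.symm
                  have hdead := loopA_dead r3 ['w', 'o', c3] (by simp)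
                    (by simp [List.cons_prefix_cons])
                    (by simp [List.cons_prefix_cons, h3])
                    (by simp [List.cons_prefix_cons])
                    (by simp [List.cons_prefix_cons])
                  simp [loopA, okB, List.isPrefixOf, h3, h3', hdead]
            · have h2' : ¬ ('o' = c2) := fun h => h2 h.symm
              have hdead := loopA_dead r2 ['w', c2] (by simp)
                (by simp [List.cons_prefix_cons])
                (by simp [List.cons_prefix_cons, h2])
                (by simp [List.cons_prefix_cons])
                (by simp [List.cons_prefix_cons])
              simp [loopA, okB, List.isPrefixOf, h2, h2', hdead]
        · by_cases hy : c = 'y'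
          · subst hy
            rcases rest with _ | ⟨c2, r2⟩
            · simp [loopA, okB, List.isPrefixOf]
            · by_cases h2 : c2 = 'e'
              · subst h2
                have hr : r2.length ≤ n := by simp at hlen; omega
                have el : loopA [] ('y'::'e'::r2) = loopA [] r2 := by simp [loopA]
                have eo : okB ('y'::'e'::r2) = okB r2 := by
                  conv_lhs => rw [okB]
                  simp [List.isPrefixOf]
                rw [el, eo]
                exact ih r2 hr
              · have h2' : ¬ ('e' = c2) := fun h => h2 h.symm
                have hdead := loopA_dead r2 ['y', c2] (by simp)
                  (by simp [List.cons_prefix_cons])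
                  (by simp [List.cons_prefix_cons])
                  (by simp [List.cons_prefix_cons, h2])
                  (by simp [List.cons_prefix_cons])
                simp [loopA, okB, List.isPrefixOf, h2, h2', hdead]
          · by_cases hm : c = 'm'
            · subst hm
              rcases rest with _ | ⟨c2, r2⟩
              · simp [loopA, okB, List.isPrefixOf]
              · by_cases h2 : c2 = 'a'
                · subst h2
                  have hr : r2.length ≤ n := by simp at hlen; omega
                  have el : loopA [] ('m'::'a'::r2) = loopA [] r2 := by simp [loopA]
                  have eo : okB ('m'::'a'::r2) = okB r2 := by
                    conv_lhs => rw [okB]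
                    simp [List.isPrefixOf]
                  rw [el, eo]
                  exact ih r2 hr
                · have h2' : ¬ ('a' = c2) := fun h => h2 h.symm
                  have hdead := loopA_dead r2 ['m', c2] (by simp)
                    (by simp [List.cons_prefix_cons])
                    (by simp [List.cons_prefix_cons])
                    (by simp [List.cons_prefix_cons])
                    (by simp [List.cons_prefix_cons, h2])
                  simp [loopA, okB, List.isPrefixOf, h2, h2', hdead]
            · have ha' : ¬ ('a' = c) := fun h => ha h.symm
              have hw' : ¬ ('w' = c) := fun h => hw h.symm
              have hy' : ¬ ('y' = c) := fun h => hy h.symm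
              have hm' : ¬ ('m' = c) := fun h => hm h.symm
              have hdead := loopA_dead rest [c] (by simp)
                (by simp [List.cons_prefix_cons, ha])
                (by simp [List.cons_prefix_cons, hw])
                (by simp [List.cons_prefix_cons, hy])
                (by simp [List.cons_prefix_cons, hm])
              simp [loopA, okB, List.isPrefixOf, ha, hw, hy, hm, ha', hw', hy', hm', hdead]

lemma foldl_count (l : List String) : ∀ c : Int,
    l.foldl (fun cnt i => if loopA [] i.toList = [] then cnt + 1 else cnt) c
      = c + (l.map (fun w => if okB w.toList then (1 : Int) else 0)).sum := by
  induction l with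
  | nil => intro c; simp
  | cons w l ih =>
    intro c
    simp only [List.foldl_cons, List.map_cons, List.sum_cons]
    rw [ih]
    by_cases hc : loopA [] w.toList = []
    · rw [if_pos hc, if_pos ((loopA_okB w.toList.length w.toList le_rfl).mp hc)]
      ring
    · rw [if_neg hc, if_neg (fun h => hc ((loopA_okB w.toList.length w.toList le_rfl).mpr h))]
      ring

-- ===== VERDICT (by name: the statement is the Claim_ definition above) =====
theorem solution_spec : Claim_equal_solution := by
  intro babbling _
  unfold Spec_solution solution solution_alt
  simpa using foldl_count babbling 0
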